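-- pv_equiv track=rewrite | github.com/adcosta17/somrit-test | scripts/generate_pbsim_run_nested.py | check_nearby
-- ===== SOURCE A (Python) =====
-- def check_nearby(chrom, start, end, seen):
--     i = start
--     count = 0
--     nearby = {}
--     if chrom not in seen:
--         return False
--     while i < end:
--         if i in seen[chrom]:
--             return True
--         i += 1
--     return False
-- ===== SOURCE B (Python) =====
-- def check_nearby(chrom, start, end, seen):
--     positions = seen.get(chrom)
--     if positions is None:
--         return False
--     return any(start <= p < end for p in positions)
-- ===== Notes on version B (the rewrite author's own statement) =====
-- stated objective: alternative
-- what changed: Instead of scanning every integer position i in [start,end) and testing membership in seen[chrom] for each, B looks the chromosome up once and does a single pass over its stored positions testing start <= p < end; cost depends on the position list, not on end-start.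
import Mathlib
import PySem

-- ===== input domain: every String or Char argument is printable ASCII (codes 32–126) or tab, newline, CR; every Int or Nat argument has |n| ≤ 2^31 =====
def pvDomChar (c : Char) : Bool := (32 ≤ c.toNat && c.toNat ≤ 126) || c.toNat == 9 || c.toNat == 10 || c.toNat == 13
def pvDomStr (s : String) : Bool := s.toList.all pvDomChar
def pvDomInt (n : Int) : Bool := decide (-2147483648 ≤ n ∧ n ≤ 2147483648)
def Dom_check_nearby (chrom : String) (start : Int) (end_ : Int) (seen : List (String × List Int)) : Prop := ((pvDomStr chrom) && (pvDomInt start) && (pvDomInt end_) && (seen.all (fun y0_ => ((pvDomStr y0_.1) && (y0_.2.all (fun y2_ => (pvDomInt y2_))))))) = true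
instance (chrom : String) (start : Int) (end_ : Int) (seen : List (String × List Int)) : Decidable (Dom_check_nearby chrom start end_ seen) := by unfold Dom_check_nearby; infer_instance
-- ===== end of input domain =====

-- B replaces A's scan of every integer in [start,end) (membership test per position) by one
-- pass over the stored positions of the chromosome testing start <= p < end; same value always.


-- dict lookup (first match), used by both ports for 'chrom in seen' / 'seen[chrom]' / 'seen.get(chrom)'
def pvLookup (seen : List (String × List Int)) (chrom : String) : Option (List Int) :=
  match seen with
  | [] => none
  | (k, v) :: rest => if k == chrom then some v else pvLookup rest chrom

-- ===== PORT A =====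
-- the 'while i < end' loop of A: test each integer position for membership
def pvScanA (pos : List Int) (i end_ : Int) : Bool :=
  if i < end_ then
    if pos.contains i then true else pvScanA pos (i + 1) end_
  else false
termination_by (end_ - i).toNat
decreasing_by omega

def check_nearby (chrom : String) (start : Int) (end_ : Int) (seen : List (String × List Int)) : Bool :=
  match pvLookup seen chrom with
  | none => false                 -- 'if chrom not in seen: return False'
  | some pos => pvScanA pos start end_

-- ===== PORT B =====
def check_nearby_alt (chrom : String) (start : Int) (end_ : Int) (seen : List (String × List Int)) : Bool :=
  match pvLookup seen chrom with
  | none => false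
  | some pos => pos.any (fun p => decide (start ≤ p) && decide (p < end_))

-- ===== PRECONDITION & SPEC =====
def Spec_check_nearby (chrom : String) (start : Int) (end_ : Int) (seen : List (String × List Int)) (out : Bool) : Prop := out = check_nearby_alt chrom start end_ seen
instance (chrom : String) (start : Int) (end_ : Int) (seen : List (String × List Int)) (out : Bool) : Decidable (Spec_check_nearby chrom start end_ seen out) := by unfold Spec_check_nearby; infer_instance

-- ===== CLAIM (what is proved, stated in full; the proofs are below) =====
def Claim_equal_check_nearby : Prop := ∀ (chrom : String) (start : Int) (end_ : Int) (seen : List (String × List Int)), Dom_check_nearby chrom start end_ seen → Spec_check_nearby chrom start end_ seen (check_nearby chrom start end_ seen)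

-- ===== LEMMAS AND PROOFS =====
theorem pvScanA_eq_any (pos : List Int) (i end_ : Int) :
    pvScanA pos i end_ = pos.any (fun p => decide (i ≤ p) && decide (p < end_)) := by
  rw [pvScanA]
  split
  · rename_i hlt
    by_cases hc : pos.contains i
    · simp only [hc, if_true]
      symm
      rw [List.any_eq_true]
      exact ⟨i, by simpa using hc, by simp [hlt]⟩
    · rw [if_neg hc]
      rw [pvScanA_eq_any pos (i + 1) end_]
      rw [Bool.eq_iff_iff]
      simp only [List.any_eq_true, Bool.and_eq_true, decide_eq_true_iff]
      constructor
      · rintro ⟨p, hp, h1, h2⟩; exact ⟨p, hp, by omega, h2⟩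
      · rintro ⟨p, hp, h1, h2⟩
        have hne : p ≠ i := by
          intro h; exact hc (List.elem_iff.mpr (h ▸ hp))
        exact ⟨p, hp, by omega, h2⟩
  · rename_i hge
    symm
    rw [List.any_eq_false]
    intro p _
    simp only [Bool.and_eq_true, decide_eq_true_iff]
    omega
termination_by (end_ - i).toNat
decreasing_by omega

-- ===== VERDICT (by name: the statement is the Claim_ definition above) =====
theorem check_nearby_spec : Claim_equal_check_nearby := by
  intro chrom start end_ seen _
  unfold Spec_check_nearby check_nearby check_nearby_alt
  cases pvLookup seen chrom with
  | none => rfl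
  | some pos => exact pvScanA_eq_any pos start end_
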